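-- pv_equiv track=rewrite | github.com/Doktor-sys/mietrecht | scripts/ml/pytorchLegalClassifier.py | build_vocabulary
-- ===== SOURCE A (Python) =====
-- def build_vocabulary(texts):
--     """Build vocabulary from texts"""
--     vocab = {"<PAD>": 0, "<UNK>": 1}
--     idx = 2
--
--     for text in texts:
--         # Preprocess text
--         processed_text = text.lower()
--         processed_text = ''.join(char if char.isalnum() or char in 'äöüß ' else ' ' for char in processed_text)
--         tokens = processed_text.split()
--         tokens = [token for token in tokens if len(token) > 2]
--
--         # Add tokens to vocabulary
--         for token in tokens:
--             if token not in vocab: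
--                 vocab[token] = idx
--                 idx += 1
--
--     return vocab
-- ===== SOURCE B (Python) =====
-- def build_vocabulary(texts):
--     """Build vocabulary from texts"""
--     # Flatten every surviving token of every text into one list.
--     words = []
--     for text in texts:
--         processed = text.lower()
--         processed = ''.join(ch if ch.isalnum() or ch in 'äöüß ' else ' ' for ch in processed)
--         words.extend(t for t in processed.split() if len(t) > 2)
--     # Rank the distinct tokens by the position of their first occurrence:
--     # sorting set(words) by words.index reconstructs first-appearance order.
--     vocab = {"<PAD>": 0, "<UNK>": 1}
--     for rank, tok in enumerate(sorted(set(words), key=words.index), start=2):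
--         vocab[tok] = rank
--     return vocab
-- ===== Notes on version B (the rewrite author's own statement) =====
-- stated objective: alternative
-- what changed: Instead of A's single interleaved pass that grows the vocab with a membership test and a manual id counter, B flattens all surviving tokens, then recovers first-appearance order by sorting the distinct tokens (set(words)) by the position of their first occurrence (key=words.index) and assigns ids with enumerate(..., start=2).
import Mathlib
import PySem

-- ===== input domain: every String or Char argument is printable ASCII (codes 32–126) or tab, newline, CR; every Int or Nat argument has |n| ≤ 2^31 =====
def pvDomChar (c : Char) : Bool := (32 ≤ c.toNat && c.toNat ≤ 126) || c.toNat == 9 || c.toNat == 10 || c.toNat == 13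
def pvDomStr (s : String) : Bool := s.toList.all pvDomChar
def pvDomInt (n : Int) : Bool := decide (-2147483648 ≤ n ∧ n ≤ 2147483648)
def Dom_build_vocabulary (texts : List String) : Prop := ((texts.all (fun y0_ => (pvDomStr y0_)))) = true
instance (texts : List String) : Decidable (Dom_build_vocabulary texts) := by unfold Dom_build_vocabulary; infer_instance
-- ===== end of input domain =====

-- B replaces A's single interleaved membership-check/counter pass by flattening all tokens and
-- then sorting the distinct tokens by their first-occurrence index (sorted(set(words), key=words.index));
-- an alternative decomposition, not claimed faster.

-- ===== PORT A =====
-- A's per-text preprocessing: lower, keep alnum/'äöüß '-chars (others → ' '), split, keep len > 2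
def prepA (text : String) : List String :=
  let processed := PySem.Str.lower text
  let processed2 := String.mk (processed.toList.map
    (fun c => if PySem.Chars.isalnum c || c ∈ "äöüß ".toList then c else ' '))
  (PySem.Str.split₀ processed2).filter (fun tok => 2 < PySem.Str.len tok)

-- body of A's inner token loop over the state (vocab, idx)
def bvA_step (st : PySem.Dict String Int × Int) (tok : String) : PySem.Dict String Int × Int :=
  if st.1.contains tok then st else (st.1.insert tok st.2, st.2 + 1)

def build_vocabulary (texts : List String) : List (String × Int) :=
  (texts.foldl (fun st text => (prepA text).foldl bvA_step st)
    (PySem.Dict.mk [("<PAD>", 0), ("<UNK>", 1)], 2)).1.items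

-- ===== PORT B =====
-- B's preprocessing (identical expression, B's own copy)
def prepB (text : String) : List String :=
  let processed := PySem.Str.lower text
  let processed2 := String.mk (processed.toList.map
    (fun c => if PySem.Chars.isalnum c || c ∈ "äöüß ".toList then c else ' '))
  (PySem.Str.split₀ processed2).filter (fun tok => 2 < PySem.Str.len tok)

def build_vocabulary_alt (texts : List String) : List (String × Int) :=
  -- words.extend(...) over all texts
  let words := texts.foldl (fun acc text => acc ++ prepB text) []
  -- sorted(set(words), key=words.index); words.index t never raises here (every t ∈ set(words)
  -- occurs in words), so the .getD 0 arm of the hand-ported key is never the result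
  let ordered := PySem.List.sorted (PySem.Set.ofList words)
    (fun t => (PySem.List.index? words t).getD 0) false
  -- enumerate(..., start=2) inserted into {"<PAD>":0, "<UNK>":1}
  ((PySem.List.enumerate ordered 2).foldl (fun d p => d.insert p.2 p.1)
    (PySem.Dict.mk [("<PAD>", 0), ("<UNK>", 1)])).items

-- ===== PRECONDITION & SPEC =====
def Spec_build_vocabulary (texts : List String) (out : List (String × Int)) : Prop := out = build_vocabulary_alt texts
instance (texts : List String) (out : List (String × Int)) : Decidable (Spec_build_vocabulary texts out) := by unfold Spec_build_vocabulary; infer_instance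

-- ===== CLAIM (what is proved, stated in full; the proofs are below) =====
def Claim_equal_build_vocabulary : Prop := ∀ (texts : List String), Dom_build_vocabulary texts → Spec_build_vocabulary texts (build_vocabulary texts)

-- ===== LEMMAS AND PROOFS =====

-- first-appearance-order new tokens relative to a seen list
def newTokens (seen : List String) : List String → List String
  | [] => []
  | t :: ts => if t ∈ seen then newTokens seen ts else t :: newTokens (t :: seen) ts

theorem newTokens_congr (ts : List String) : ∀ (s1 s2 : List String),
    (∀ x, x ∈ s1 ↔ x ∈ s2) → newTokens s1 ts = newTokens s2 ts := by
  induction ts with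
  | nil => intro _ _ _; rfl
  | cons t ts ih =>
    intro s1 s2 h
    simp only [newTokens]
    by_cases ht : t ∈ s1
    · rw [if_pos ht, if_pos ((h t).1 ht), ih _ _ h]
    · rw [if_neg ht, if_neg (fun hc => ht ((h t).2 hc)), ih (t :: s1) (t :: s2)
        (by intro x; simp [h x])]

theorem newTokens_nodup (ts : List String) : ∀ (seen : List String),
    (newTokens seen ts).Nodup ∧ ∀ x ∈ newTokens seen ts, x ∉ seen := by
  induction ts with
  | nil => intro seen; simp [newTokens]
  | cons t ts ih =>
    intro seen
    simp only [newTokens]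
    by_cases ht : t ∈ seen
    · rw [if_pos ht]; exact ih seen
    · rw [if_neg ht]
      obtain ⟨hnd, hns⟩ := ih (t :: seen)
      refine ⟨List.nodup_cons.2 ⟨fun hc => (hns t hc) (by simp), hnd⟩, ?_⟩
      intro x hx
      rcases List.mem_cons.1 hx with rfl | hx
      · exact ht
      · intro hs; exact hns x hx (by simp [hs])

theorem newTokens_drop_seen (ts : List String) : ∀ (extra seen : List String),
    (∀ t ∈ ts, t ∉ extra) → newTokens (extra ++ seen) ts = newTokens seen ts := by
  induction ts with
  | nil => intro _ _ _; rfl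
  | cons t ts ih =>
    intro extra seen h
    have hte : t ∉ extra := h t (by simp)
    simp only [newTokens]
    by_cases hts : t ∈ seen
    · rw [if_pos (by simp [hts]), if_pos hts, ih extra seen (fun x hx => h x (by simp [hx]))]
    · rw [if_neg (by simp [hte, hts]), if_neg hts]
      rw [newTokens_congr ts (t :: (extra ++ seen)) (extra ++ (t :: seen)) (by intro x; simp; tauto)]
      rw [ih extra (t :: seen) (fun x hx => h x (by simp [hx]))]

-- membership in newTokens
theorem mem_newTokens (ts : List String) : ∀ (seen : List String) (x : String),
    x ∈ newTokens seen ts ↔ x ∈ ts ∧ x ∉ seen := by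
  induction ts with
  | nil => intro seen x; simp [newTokens]
  | cons t ts ih =>
    intro seen x
    simp only [newTokens]
    by_cases ht : t ∈ seen
    · rw [if_pos ht, ih]
      constructor
      · rintro ⟨h1, h2⟩; exact ⟨List.mem_cons_of_mem t h1, h2⟩
      · rintro ⟨h1, h2⟩
        rcases List.mem_cons.1 h1 with rfl | h1
        · exact absurd ht h2
        · exact ⟨h1, h2⟩
    · rw [if_neg ht]
      constructor
      · intro hx
        rcases List.mem_cons.1 hx with rfl | hx
        · exact ⟨by simp, ht⟩
        · obtain ⟨h1, h2⟩ := (ih (t :: seen) x).1 hx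
          exact ⟨List.mem_cons_of_mem t h1, fun hs => h2 (by simp [hs])⟩
      · rintro ⟨h1, h2⟩
        rcases List.mem_cons.1 h1 with rfl | h1
        · simp
        · by_cases hxt : x = t
          · simp [hxt]
          · exact List.mem_cons_of_mem t ((ih (t :: seen) x).2 ⟨h1, by simp [hxt, h2]⟩)

-- the successive elements of newTokens have strictly increasing first-occurrence indices
theorem newTokens_pairwise_idxOf (ts : List String) : ∀ (seen : List String),
    (newTokens seen ts).Pairwise (fun a b => ts.idxOf a < ts.idxOf b) := by
  induction ts with
  | nil => intro seen; simp [newTokens]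
  | cons t ts ih =>
    intro seen
    simp only [newTokens]
    by_cases ht : t ∈ seen
    · rw [if_pos ht]
      refine (ih seen).imp_of_mem ?_
      intro a b ha hb hab
      have hat : a ≠ t := fun h => ((newTokens_nodup ts seen).2 a ha) (h ▸ ht)
      have hbt : b ≠ t := fun h => ((newTokens_nodup ts seen).2 b hb) (h ▸ ht)
      simpa [List.idxOf_cons, hat, hbt, Ne.symm hat, Ne.symm hbt] using Nat.succ_lt_succ hab
    · rw [if_neg ht]
      refine List.pairwise_cons.2 ⟨?_, ?_⟩
      · intro b hb
        have hbt : b ≠ t := fun h =>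
          ((newTokens_nodup ts (t :: seen)).2 b hb) (by simp [h])
        simp [List.idxOf_cons, hbt, Ne.symm hbt]
      · refine (ih (t :: seen)).imp_of_mem ?_
        intro a b ha hb hab
        have hat : a ≠ t := fun h =>
          ((newTokens_nodup ts (t :: seen)).2 a ha) (by simp [h])
        have hbt : b ≠ t := fun h =>
          ((newTokens_nodup ts (t :: seen)).2 b hb) (by simp [h])
        simpa [List.idxOf_cons, hat, hbt, Ne.symm hat, Ne.symm hbt] using Nat.succ_lt_succ hab

-- flattening foldl-append
theorem foldl_append_flat {α β : Type} (f : α → List β) (l : List α) : ∀ (acc : List β),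
    l.foldl (fun a t => a ++ f t) acc = acc ++ l.flatMap f := by
  induction l with
  | nil => intro acc; simp
  | cons t l ih => intro acc; simp [List.foldl_cons, ih, List.flatMap_cons]

-- the nested text/token loop of A is the token loop over the flattened token list
theorem nested_foldl (texts : List String) : ∀ (st : PySem.Dict String Int × Int),
    texts.foldl (fun st text => (prepA text).foldl bvA_step st) st
      = (texts.flatMap prepA).foldl bvA_step st := by
  induction texts with
  | nil => intro st; simp
  | cons t ts ih => intro st; simp [List.foldl_cons, ih, List.flatMap_cons, List.foldl_append]

theorem keys_insert {ν : Type} (d : PySem.Dict String ν) (k : String) (v : ν) :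
    (d.insert k v).keys = if d.contains k then d.keys else d.keys ++ [k] := by
  by_cases h : d.contains k
  · rw [if_pos h]
    simp only [PySem.Dict.insert, if_pos h, PySem.Dict.keys, List.map_map]
    apply List.map_congr_left
    intro p _
    by_cases hp : p.1 == k
    · simp only [Function.comp, hp]
      exact (eq_of_beq hp).symm
    · simp [Function.comp, hp]
  · rw [if_neg h]
    simp [PySem.Dict.insert, h, PySem.Dict.keys]

theorem items_insert_fresh {ν : Type} (d : PySem.Dict String ν) (k : String) (v : ν)
    (h : d.contains k = false) : (d.insert k v).items = d.items ++ [(k, v)] := by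
  simp [PySem.Dict.insert, h]

theorem contains_iff_mem_keys {ν : Type} (d : PySem.Dict String ν) (k : String) :
    d.contains k = true ↔ k ∈ d.keys := by
  rw [PySem.Dict.contains_eq_decide_mem_keys]; simp

-- enumerate facts
theorem enumerate_cons {α : Type} (x : α) (xs : List α) (s : Int) :
    PySem.List.enumerate (x :: xs) s = (s, x) :: PySem.List.enumerate xs (s + 1) := rfl

theorem enumerate_map_snd {α : Type} (xs : List α) : ∀ (s : Int),
    (PySem.List.enumerate xs s).map (·.2) = xs := by
  induction xs with
  | nil => intro s; rfl
  | cons x xs ih => intro s; simp [ih]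

-- A's token loop, characterised
theorem loop_items (ts : List String) : ∀ (d : PySem.Dict String Int) (i : Int),
    d.keys.Nodup →
    ts.foldl bvA_step (d, i)
      = (PySem.Dict.mk (d.items ++ (PySem.List.enumerate (newTokens d.keys ts) i).map
          (fun p => (p.2, p.1))), i + (newTokens d.keys ts).length) := by
  induction ts with
  | nil => intro d i _; simp [newTokens]
  | cons t ts ih =>
    intro d i hnd
    simp only [List.foldl_cons, bvA_step, newTokens]
    by_cases hc : d.contains t
    · rw [if_pos hc, if_pos ((contains_iff_mem_keys d t).1 hc), ih d i hnd]
    · have hc' : d.contains t = false := by simpa using hc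
      have htk : t ∉ d.keys := fun hm => hc ((contains_iff_mem_keys d t).2 hm)
      rw [if_neg hc, if_neg htk]
      have hkeys : (d.insert t i).keys = d.keys ++ [t] := by
        rw [keys_insert, if_neg (by simp [hc'])]
      have hnd' : (d.insert t i).keys.Nodup := by
        rw [hkeys, List.nodup_append]
        exact ⟨hnd, by simp, by intro a ha b hb; simp at hb; subst hb; exact fun h => htk (h ▸ ha)⟩
      rw [ih (d.insert t i) (i + 1) hnd']
      rw [hkeys, newTokens_congr ts (d.keys ++ [t]) (t :: d.keys) (by intro x; simp; tauto)]
      rw [items_insert_fresh d t i hc', enumerate_cons]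
      simp only [Prod.mk.injEq, List.map_cons, List.length_cons]
      refine ⟨by simp [List.append_assoc], by push_cast; ring⟩

theorem newTokens_subset (ts : List String) : ∀ (seen : List String),
    ∀ x ∈ newTokens seen ts, x ∈ ts := by
  intro seen x hx
  exact ((mem_newTokens ts seen x).1 hx).1

-- the hand-ported sort key (index?.getD 0) is idxOf on members
theorem index?_getD_of_mem (l : List String) (a : String) (h : a ∈ l) :
    (PySem.List.index? l a).getD 0 = l.idxOf a := by
  rw [PySem.List.index?_eq_idxOf?]
  have hs : (l.idxOf? a).isSome := by
    rw [List.isSome_idxOf?]; exact h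
  obtain ⟨k, hk⟩ := Option.isSome_iff_exists.1 hs
  simp [hk, List.idxOf_eq_getD_idxOf?]

-- B's sort reconstructs first-appearance order
theorem sorted_set_eq_newTokens (toks : List String) :
    PySem.List.sorted (PySem.Set.ofList toks)
      (fun t => (PySem.List.index? toks t).getD 0) false = newTokens [] toks := by
  apply PySem.List.sorted_eq_of_perm_of_pairwise_lt
  · apply (List.perm_ext_iff_of_nodup (newTokens_nodup toks []).1 (PySem.Set.nodup_ofList toks)).2
    intro x
    rw [mem_newTokens, PySem.Set.mem_ofList]
    simp
  · refine (newTokens_pairwise_idxOf toks []).imp_of_mem ?_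
    intro a b ha hb hab
    have hma : a ∈ toks := newTokens_subset toks [] a ha
    have hmb : b ∈ toks := newTokens_subset toks [] b hb
    simpa only [index?_getD_of_mem toks a hma, index?_getD_of_mem toks b hmb] using hab

-- no token produced by the preprocessing contains the character c if c survives neither branch
theorem split_go_not_mem (c : Char) : ∀ (cs cur : List Char) (acc : List (List Char)),
    c ∉ cs → c ∉ cur → (∀ u ∈ acc, c ∉ u) →
    ∀ t ∈ PySem.Chars.split₀.go cs cur acc, c ∉ t := by
  intro cs
  induction cs with
  | nil =>
    intro cur acc _ hcur hacc t ht
    simp only [PySem.Chars.split₀.go] at ht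
    by_cases he : cur.isEmpty
    · rw [if_pos he] at ht; exact hacc t (by simpa using ht)
    · rw [if_neg he] at ht
      simp only [List.mem_reverse, List.mem_cons] at ht
      rcases ht with rfl | ht
      · simpa using hcur
      · exact hacc t ht
  | cons a cs ih =>
    intro cur acc hcs hcur hacc t ht
    have hca : c ≠ a := fun h => hcs (by simp [h])
    have hcs' : c ∉ cs := fun h => hcs (by simp [h])
    simp only [PySem.Chars.split₀.go] at ht
    by_cases hsp : PySem.Chars.isspace a
    · rw [if_pos hsp] at ht
      by_cases he : cur.isEmpty
      · rw [if_pos he] at ht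
        exact ih [] acc hcs' (by simp) hacc t ht
      · rw [if_neg he] at ht
        refine ih [] (cur.reverse :: acc) hcs' (by simp) ?_ t ht
        intro u hu
        rcases List.mem_cons.1 hu with rfl | hu
        · simpa using hcur
        · exact hacc u hu
    · rw [if_neg hsp] at ht
      refine ih (a :: cur) acc hcs' ?_ hacc t ht
      intro h
      rcases List.mem_cons.1 h with h | h
      · exact hca h
      · exact hcur h

theorem split₀_str_no_lt (l : List Char) (hnc : '<' ∉ l) :
    ∀ tok ∈ PySem.Str.split₀ (String.mk l), '<' ∉ tok.toList := by
  intro tok htok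
  have h2 := PySem.Str.split₀_map_toList (String.mk l)
  have h3 : (String.mk l).toList = l := Eq.symm (String.ofList_eq.mp rfl)
  rw [h3] at h2
  have hm : tok.toList ∈ PySem.Chars.split₀ l := by
    rw [← h2]; exact List.mem_map_of_mem htok
  refine split_go_not_mem '<' l [] [] hnc (by simp) (by simp) tok.toList ?_
  have hgo : PySem.Chars.split₀ l = PySem.Chars.split₀.go l [] [] := rfl
  rw [← hgo]; exact hm

theorem prepA_no_lt (text : String) : ∀ tok ∈ prepA text, '<' ∉ tok.toList := by
  intro tok htok
  simp only [prepA] at htok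
  have hnc : '<' ∉ ((PySem.Str.lower text).toList.map
      (fun c => if PySem.Chars.isalnum c || c ∈ "äöüß ".toList then c else ' ')) := by
    intro hmem
    rcases List.mem_map.1 hmem with ⟨c, _, hc⟩
    by_cases h : PySem.Chars.isalnum c || c ∈ "äöüß ".toList
    · rw [if_pos h] at hc; subst hc; revert h; decide
    · rw [if_neg h] at hc; exact absurd hc (by decide)
  exact split₀_str_no_lt _ hnc tok (List.mem_of_mem_filter htok)

theorem tok_fresh (text : String) : ∀ tok ∈ prepA text,
    tok ≠ "<PAD>" ∧ tok ≠ "<UNK>" := by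
  intro tok htok
  have h := prepA_no_lt text tok htok
  constructor <;> · rintro rfl; exact h (by decide)

-- ===== VERDICT (by name: the statement is the Claim_ definition above) =====
theorem build_vocabulary_spec : Claim_equal_build_vocabulary := by
  intro texts _
  unfold Spec_build_vocabulary build_vocabulary build_vocabulary_alt
  have hprep : prepB = prepA := rfl
  rw [hprep]
  set toks := texts.flatMap prepA with htoks
  have hfresh : ∀ tok ∈ toks, tok ≠ "<PAD>" ∧ tok ≠ "<UNK>" := by
    intro tok htok
    rcases List.mem_flatMap.1 htok with ⟨t, _, hm⟩
    exact tok_fresh t tok hm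
  -- A side
  rw [nested_foldl]
  rw [loop_items toks (PySem.Dict.mk [("<PAD>", 0), ("<UNK>", 1)]) 2 (by decide)]
  -- B side
  rw [foldl_append_flat prepA texts []]
  simp only [List.nil_append]
  rw [sorted_set_eq_newTokens toks]
  set nt := newTokens [] toks with hnt
  have hsub : ∀ x ∈ nt, x ∈ toks := fun x hx => newTokens_subset toks [] x hx
  have hd0 : newTokens (PySem.Dict.mk [("<PAD>", (0:Int)), ("<UNK>", 1)]).keys toks = nt := by
    rw [hnt]
    have : (PySem.Dict.mk [("<PAD>", (0:Int)), ("<UNK>", 1)]).keys = ["<PAD>", "<UNK>"] := rfl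
    rw [this]
    have := newTokens_drop_seen toks ["<PAD>", "<UNK>"] []
    simp only [List.append_nil] at this
    apply this
    intro t ht
    have := hfresh t ht
    simp [this.1, this.2]
  rw [hd0]
  have hnodup : nt.Nodup := (newTokens_nodup toks []).1
  have hfresh2 : ∀ a ∈ PySem.List.enumerate nt 2,
      (PySem.Dict.mk [("<PAD>", (0:Int)), ("<UNK>", 1)]).contains a.2 = false := by
    intro a ha
    have ha2 : a.2 ∈ nt := by
      rw [← enumerate_map_snd nt 2]; exact List.mem_map_of_mem ha
    obtain ⟨h1, h2⟩ := hfresh a.2 (hsub a.2 ha2)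
    simp [PySem.Dict.contains_mk, Ne.symm h1, Ne.symm h2]
  have hndm : (List.map (fun a : Int × String => a.2) (PySem.List.enumerate nt 2)).Nodup := by
    rw [enumerate_map_snd]; exact hnodup
  rw [PySem.Dict.items_foldl_insert_fresh _ _ _ _ hfresh2 hndm]
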